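-- pv_equiv track=rewrite | github.com/sojeong-park/Algorithm | 문자열/접두사.py | solution
-- ===== SOURCE A (Python) =====
-- def solution(alpa_list):
--     alpa_list.sort(key=len)
--     is_prefix = False
--     cnt = 0
--     for i in range(len(alpa_list)):
--         for j in range(i+1, len(alpa_list)):
--             if alpa_list[j].startswith(alpa_list[i]):
--                 is_prefix = True
--                 break
--         if not is_prefix:
--             cnt += 1
--         is_prefix = False
--     return cnt
-- ===== SOURCE B (Python) =====
-- def solution(alpa_list):
--     uniq = sorted(set(alpa_list))
--     cnt = 0
--     for a, b in zip(uniq, uniq[1:]):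
--         if not b.startswith(a):
--             cnt += 1
--     return cnt + (1 if uniq else 0)
-- ===== Notes on version B (the rewrite author's own statement) =====
-- stated objective: faster
-- what changed: B deduplicates the list, sorts it lexicographically once, and counts the adjacent pairs where the successor does not start with the current string (a string is a proper prefix of some member iff its immediate lexicographic successor among the distinct strings starts with it), replacing A's all-pairs nested prefix scan.
import Mathlib
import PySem

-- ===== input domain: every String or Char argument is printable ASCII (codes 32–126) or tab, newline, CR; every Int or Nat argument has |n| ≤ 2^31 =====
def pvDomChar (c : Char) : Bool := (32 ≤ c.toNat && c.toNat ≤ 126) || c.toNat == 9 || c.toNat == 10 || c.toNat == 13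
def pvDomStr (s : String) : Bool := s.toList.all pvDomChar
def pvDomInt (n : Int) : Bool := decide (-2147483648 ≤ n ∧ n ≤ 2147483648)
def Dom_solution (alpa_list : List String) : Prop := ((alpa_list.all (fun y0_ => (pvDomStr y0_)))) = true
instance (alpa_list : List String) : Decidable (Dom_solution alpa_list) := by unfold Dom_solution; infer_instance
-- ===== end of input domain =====

-- B replaces A's quadratic all-pairs prefix scan by dedup + one lexicographic sort + an adjacent-pairs
-- scan (objective: faster). A sorts its argument in place; the equivalence proved here is about the
-- RETURN value only (B does not mutate its argument).

-- ===== PORT A =====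
-- inner 'for j in range(i+1, len(...))' loop with its break
def solutionInner (l : List String) (s : String) : List Int → Bool
  | [] => false
  | j :: js =>
    if PySem.Str.startswith (PySem.List.pyGetD l j "") s then true
    else solutionInner l s js

def solution (alpa_list : List String) : Int :=
  let l := PySem.List.sorted alpa_list (fun s => PySem.Str.len s)
  let st := (PySem.List.pyRange 0 (l.length : Int)).foldl
    (fun (st : Bool × Int) i =>
      let isp := st.1 || solutionInner l (PySem.List.pyGetD l i "") (PySem.List.pyRange (i + 1) (l.length : Int))
      (false, if isp then st.2 else st.2 + 1))
    (false, 0)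
  st.2

-- ===== PORT B =====
def solution_alt (alpa_list : List String) : Int :=
  let uniq := PySem.List.sorted (PySem.Set.ofList alpa_list) (fun x => x)
  let cnt := (uniq.zip (PySem.List.slice uniq (some 1) none)).foldl
    (fun (c : Int) ab => if !(PySem.Str.startswith ab.2 ab.1) then c + 1 else c) 0
  cnt + (if uniq.isEmpty then 0 else 1)

-- ===== PRECONDITION & SPEC =====
def Spec_solution (alpa_list : List String) (out : Int) : Prop := out = solution_alt alpa_list
instance (alpa_list : List String) (out : Int) : Decidable (Spec_solution alpa_list out) := by unfold Spec_solution; infer_instance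

-- ===== CLAIM (what is proved, stated in full; the proofs are below) =====
def Claim_equal_solution : Prop := ∀ (alpa_list : List String), Dom_solution alpa_list → Spec_solution alpa_list (solution alpa_list)

-- ===== LEMMAS AND PROOFS =====

-- "s is a proper-length prefix of some member of xs"
def pvPb (xs : List String) (s : String) : Bool :=
  xs.any (fun t => PySem.Str.startswith t s && decide (PySem.Str.len s < PySem.Str.len t))

-- the common count both programs compute: distinct members of xs that are not a proper prefix of a member
def pvN (xs : List String) : Int :=
  ((xs.toFinset.filter (fun s => pvPb xs s = false)).card : Int)

def pvArow (r : List String) (s : String) : Bool := r.any (fun t => PySem.Str.startswith t s)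

def pvAcount : List String → Int
  | [] => 0
  | s :: r => (if pvArow r s then 0 else 1) + pvAcount r

def pvPcount : List String → Int
  | [] => 0
  | [_] => 0
  | a :: b :: r => (if PySem.Str.startswith b a then 0 else 1) + pvPcount (b :: r)

-- string facts
lemma pv_sw_iff (s t : String) : PySem.Str.startswith t s = true ↔ s.toList <+: t.toList := by
  rw [PySem.Str.startswith_eq]; exact PySem.Chars.startswith_iff _ _

lemma pv_sw_self (s : String) : PySem.Str.startswith s s = true :=
  (pv_sw_iff s s).mpr (List.prefix_refl _)

lemma pv_len_le_of_sw (s t : String) (h : PySem.Str.startswith t s = true) :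
    PySem.Str.len s ≤ PySem.Str.len t := by
  have := ((pv_sw_iff s t).mp h).length_le
  simp only [PySem.Str.len_eq]
  exact_mod_cast this

lemma pv_eq_of_sw_len (s t : String) (h : PySem.Str.startswith t s = true)
    (hlen : ¬ PySem.Str.len s < PySem.Str.len t) : s = t := by
  have hp := (pv_sw_iff s t).mp h
  have hle := pv_len_le_of_sw s t h
  have : PySem.Str.len s = PySem.Str.len t := le_antisymm hle (not_lt.mp hlen)
  exact String.toList_inj.mp (hp.eq_of_length (by simpa [PySem.Str.len_eq] using this))

lemma pv_len_lt_of_proper (s t : String) (h : s.toList <+: t.toList) (hne : s ≠ t) :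
    PySem.Str.len s < PySem.Str.len t := by
  by_contra hlt
  exact hne (pv_eq_of_sw_len s t ((pv_sw_iff s t).mpr h) hlt)

-- lexicographic facts on List Char
lemma pv_lex_append (p : List Char) (c : Char) (r : List Char) :
    List.Lex (· < ·) p (p ++ (c :: r)) := by
  induction p with
  | nil => exact List.Lex.nil
  | cons a p ih => exact List.Lex.cons ih

lemma pv_lt_toList (s t : String) (h : s < t) :
    List.Lex (· < ·) s.toList t.toList := by
  have := String.lt_iff_toList_lt.mp h
  exact (List.lt_iff_lex_lt _ _).mp this

lemma pv_lt_of_proper_prefix (s t : String) (h : s.toList <+: t.toList) (hne : s ≠ t) : s < t := by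
  obtain ⟨r, hr⟩ := h
  cases r with
  | nil => exact absurd (String.toList_inj.mp (by simpa using hr)) hne
  | cons c r' =>
    rw [String.lt_iff_toList_lt, ← hr]
    exact (List.lt_iff_lex_lt _ _).mpr (pv_lex_append _ _ _)

-- if p is a prefix of t and p < u < t lexicographically, p is a prefix of u
lemma pv_lex_between : ∀ (p u t : List Char), p <+: t →
    List.Lex (· < ·) p u → List.Lex (· < ·) u t → p <+: u := by
  intro p
  induction p with
  | nil => intro u t _ _ _; exact List.nil_prefix
  | cons c p ih =>
    intro u t hpt hpu hut
    obtain ⟨r, hr⟩ := hpt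
    cases u with
    | nil => cases hpu
    | cons d u' =>
      cases t with
      | nil => cases hut
      | cons e t' =>
        have hce : c = e ∧ p <+: t' := by
          have : c :: (p ++ r) = e :: t' := by simpa using hr
          exact ⟨by injection this, ⟨r, by injection this⟩⟩
        obtain ⟨rfl, hpt'⟩ := hce
        cases hpu with
        | cons h1 =>
          cases hut with
          | cons h2 => exact List.cons_prefix_cons.mpr ⟨rfl, ih _ _ hpt' h1 h2⟩
          | rel h2 => exact absurd h2 (lt_irrefl _)
        | rel h1 =>
          cases hut with
          | cons h2 => exact absurd h1 (lt_irrefl _)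
          | rel h2 => exact absurd (h1.trans h2) (lt_irrefl _)

-- ===== A-side =====
lemma pv_innerA_any (l : List String) (s : String) (js : List Int) :
    solutionInner l s js = js.any (fun j => PySem.Str.startswith (PySem.List.pyGetD l j "") s) := by
  induction js with
  | nil => rfl
  | cons j js ih =>
    simp only [solutionInner, List.any_cons]
    rw [ih]
    cases hsw : PySem.Str.startswith (PySem.List.pyGetD l j "") s
    · simp
    · simp

lemma pv_any_drop (l : List String) (s : String) (k : Nat) :
    (PySem.List.pyRange ((k : Int) + 1) (l.length : Int)).any
      (fun j => PySem.Str.startswith (PySem.List.pyGetD l j "") s)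
    = pvArow (l.drop (k + 1)) s := by
  have hmap := PySem.List.map_pyGetD_pyRange' l "" (a := (k : Int) + 1) (by positivity)
  have h2 : (((k : Int) + 1).toNat) = k + 1 := by omega
  rw [pvArow, ← h2, ← hmap, List.any_map]
  rfl

lemma pv_outerA (l : List String) : ∀ (m k : Nat) (c : Int), l.length - k = m → k ≤ l.length →
    ((PySem.List.pyRange (k : Int) (l.length : Int)).foldl
      (fun (st : Bool × Int) i =>
        let isp := st.1 || solutionInner l (PySem.List.pyGetD l i "") (PySem.List.pyRange (i + 1) (l.length : Int))
        (false, if isp then st.2 else st.2 + 1))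
      (false, c))
    = (false, c + pvAcount (l.drop k)) := by
  intro m
  induction m with
  | zero =>
    intro k c hm hk
    have hk' : k = l.length := by omega
    subst hk'
    rw [PySem.List.pyRange_one_eq_nil (le_refl _)]
    simp [pvAcount]
  | succ m ih =>
    intro k c hm hk
    have hklt : k < l.length := by omega
    rw [PySem.List.pyRange_one_cons (by exact_mod_cast hklt)]
    simp only [List.foldl_cons]
    have hget : PySem.List.pyGetD l (k : Int) "" = l[k] := by
      rw [PySem.List.pyGetD_natCast]
      exact List.getD_eq_getElem l "" hklt
    rw [pv_innerA_any, hget, pv_any_drop]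
    have hdrop : l.drop k = l[k] :: l.drop (k + 1) := (List.getElem_cons_drop hklt).symm
    have hrec := ih (k + 1) (if (false || pvArow (l.drop (k + 1)) l[k]) then c else c + 1)
      (by omega) (by omega)
    rw [show ((k : Int) + 1) = ((k + 1 : Nat) : Int) by push_cast; ring, hrec, hdrop]
    simp only [pvAcount, Bool.false_or]
    split_ifs <;> rw [Prod.mk.injEq] <;> exact ⟨rfl, by ring⟩

lemma pv_solution_eq_acount (xs : List String) :
    solution xs = pvAcount (PySem.List.sorted xs (fun s => PySem.Str.len s)) := by
  have h := pv_outerA (PySem.List.sorted xs (fun s => PySem.Str.len s))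
      (PySem.List.sorted xs (fun s => PySem.Str.len s)).length 0 0 (by omega) (by omega)
  push_cast at h
  simp only [solution]
  rw [h]
  simp

lemma pv_acount_eq_pvN (l : List String)
    (hp : l.Pairwise (fun a b => PySem.Str.len a ≤ PySem.Str.len b)) :
    pvAcount l = pvN l := by
  induction l with
  | nil => simp [pvAcount, pvN]
  | cons s r ih =>
    rw [List.pairwise_cons] at hp
    obtain ⟨hs, hr⟩ := hp
    have f1 : ∀ x ∈ r, pvPb (s :: r) x = pvPb r x := by
      intro x hx
      have hfalse : (PySem.Str.startswith s x && decide (PySem.Str.len x < PySem.Str.len s)) = false := by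
        cases hsw : PySem.Str.startswith s x
        · simp
        · simp only [Bool.true_and]
          exact decide_eq_false (not_lt.mpr (hs x hx))
      simp only [pvPb, List.any_cons, hfalse, Bool.false_or]
    have f2 : pvArow r s = true ↔ (pvPb (s :: r) s = true ∨ s ∈ r) := by
      constructor
      · intro h
        obtain ⟨t, ht, hsw⟩ := List.any_eq_true.mp h
        by_cases hlt : PySem.Str.len s < PySem.Str.len t
        · refine Or.inl (List.any_eq_true.mpr ⟨t, List.mem_cons_of_mem _ ht, ?_⟩)
          rw [Bool.and_eq_true]
          exact ⟨hsw, decide_eq_true hlt⟩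
        · exact Or.inr (pv_eq_of_sw_len s t hsw hlt ▸ ht)
      · rintro (h | h)
        · obtain ⟨t, ht, hsw⟩ := List.any_eq_true.mp h
          rw [Bool.and_eq_true] at hsw
          rcases List.mem_cons.mp ht with rfl | ht'
          · have := of_decide_eq_true hsw.2
            exact absurd this (lt_irrefl _)
          · exact List.any_eq_true.mpr ⟨t, ht', hsw.1⟩
        · exact List.any_eq_true.mpr ⟨s, h, pv_sw_self s⟩
    have hcongr : (r.toFinset.filter (fun x => pvPb (s :: r) x = false))
        = (r.toFinset.filter (fun x => pvPb r x = false)) :=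
      Finset.filter_congr (fun x hx => by rw [f1 x (List.mem_toFinset.mp hx)])
    by_cases hmem : s ∈ r
    · have harow : pvArow r s = true := f2.mpr (Or.inr hmem)
      have hfin2 : (s :: r).toFinset = r.toFinset := by
        rw [List.toFinset_cons, Finset.insert_eq_self]
        exact List.mem_toFinset.mpr hmem
      have hN : pvN (s :: r) = pvN r := by
        simp only [pvN]
        rw [hfin2, hcongr]
      calc pvAcount (s :: r) = pvAcount r := by rw [pvAcount, harow]; simp
        _ = pvN r := ih hr
        _ = pvN (s :: r) := hN.symm
    · have hfin : (s :: r).toFinset = insert s r.toFinset := List.toFinset_cons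
      have hsns : s ∉ r.toFinset := fun h => hmem (List.mem_toFinset.mp h)
      have hcard : pvN (s :: r) = (if pvPb (s :: r) s = false then 1 else 0) + pvN r := by
        simp only [pvN]
        rw [hfin, Finset.filter_insert]
        split_ifs with h
        · rw [Finset.card_insert_of_notMem (fun hmem' => hsns (Finset.mem_of_mem_filter _ hmem')),
            hcongr]
          push_cast
          ring
        · rw [hcongr]
          ring
      have harow_eq : pvArow r s = pvPb (s :: r) s := by
        rcases Bool.eq_false_or_eq_true (pvPb (s :: r) s) with h | h <;> rw [h]
        · exact f2.mpr (Or.inl h)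
        · rcases Bool.eq_false_or_eq_true (pvArow r s) with h2 | h2
          · rcases f2.mp h2 with h3 | h3
            · rw [h] at h3; cases h3
            · exact absurd h3 hmem
          · exact h2
      rw [pvAcount, ih hr, hcard, harow_eq]
      cases h : pvPb (s :: r) s
      · simp
      · simp

-- ===== B-side =====
lemma pv_zipfold (u : List String) : ∀ (c : Int),
    ((u.zip u.tail).foldl
      (fun (c : Int) ab => if !(PySem.Str.startswith ab.2 ab.1) then c + 1 else c) c)
    = c + pvPcount u := by
  induction u with
  | nil => intro c; simp [pvPcount]
  | cons a u ih =>
    intro c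
    cases u with
    | nil => simp [pvPcount]
    | cons b r =>
      simp only [List.tail_cons, List.zip_cons_cons, List.foldl_cons]
      have hih := ih (if !(PySem.Str.startswith b a) then c + 1 else c)
      simp only [List.tail_cons] at hih
      rw [hih, pvPcount]
      cases hsw : PySem.Str.startswith b a
      · simp
        ring
      · simp

lemma pv_alt_eq (xs : List String) :
    solution_alt xs = pvPcount (PySem.List.sorted (PySem.Set.ofList xs) (fun x => x))
      + (if PySem.List.sorted (PySem.Set.ofList xs) (fun x => x) = [] then 0 else 1) := by
  simp only [solution_alt]
  rw [PySem.List.slice_from_one, pv_zipfold]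
  simp [List.isEmpty_iff]

lemma pv_bcount_eq_pvN (u : List String) (hp : u.Pairwise (· < ·)) :
    pvPcount u + (if u = [] then 0 else 1) = pvN u := by
  induction u with
  | nil => simp [pvPcount, pvN]
  | cons a r ih =>
    rw [List.pairwise_cons] at hp
    obtain ⟨ha, hr⟩ := hp
    have hmem : a ∉ r := fun h => lt_irrefl a (ha a h)
    have f1 : ∀ x ∈ r, pvPb (a :: r) x = pvPb r x := by
      intro x hx
      have hfalse : (PySem.Str.startswith a x && decide (PySem.Str.len x < PySem.Str.len a)) = false := by
        cases hsw : PySem.Str.startswith a x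
        · simp
        · simp only [Bool.true_and]
          apply decide_eq_false
          intro hlt
          have hpre := (pv_sw_iff x a).mp hsw
          have hne : x ≠ a := by rintro rfl; exact lt_irrefl _ hlt
          exact absurd (pv_lt_of_proper_prefix x a hpre hne) (asymm (ha x hx))
      simp only [pvPb, List.any_cons, hfalse, Bool.false_or]
    have hcongr : (r.toFinset.filter (fun x => pvPb (a :: r) x = false))
        = (r.toFinset.filter (fun x => pvPb r x = false)) :=
      Finset.filter_congr (fun x hx => by rw [f1 x (List.mem_toFinset.mp hx)])
    have hfin : (a :: r).toFinset = insert a r.toFinset := List.toFinset_cons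
    have hsns : a ∉ r.toFinset := fun h => hmem (List.mem_toFinset.mp h)
    have hcard : pvN (a :: r)
        = (if pvPb (a :: r) a = false then 1 else 0) + pvN r := by
      simp only [pvN]
      rw [hfin, Finset.filter_insert]
      split_ifs with h
      · rw [Finset.card_insert_of_notMem (fun hmem' => hsns (Finset.mem_of_mem_filter _ hmem')),
          hcongr]
        push_cast
        ring
      · rw [hcongr]
        ring
    cases r with
    | nil =>
      have h1 : pvPb [a] a = false := by
        simp only [pvPb, List.any_cons, List.any_nil, Bool.or_false]
        cases hsw : PySem.Str.startswith a a
        · simp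
        · simp only [Bool.true_and]
          exact decide_eq_false (lt_irrefl _)
      simp [pvPcount, pvN, Finset.filter_singleton, h1]
    | cons b r' =>
      have hab : a < b := ha b (by simp)
      have key : pvPb (a :: b :: r') a = PySem.Str.startswith b a := by
        rcases Bool.eq_false_or_eq_true (PySem.Str.startswith b a) with hsw | hsw <;> rw [hsw]
        · apply List.any_eq_true.mpr
          refine ⟨b, by simp, ?_⟩
          have hpre := (pv_sw_iff a b).mp hsw
          have hne : a ≠ b := ne_of_lt hab
          have hll := pv_len_lt_of_proper a b hpre hne
          rw [Bool.and_eq_true]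
          exact ⟨hsw, decide_eq_true hll⟩
        · rcases Bool.eq_false_or_eq_true (pvPb (a :: b :: r') a) with h | h
          · exfalso
            obtain ⟨t, ht, hq⟩ := List.any_eq_true.mp h
            rw [Bool.and_eq_true] at hq
            obtain ⟨hswt, hlt⟩ := hq
            have hlt' := of_decide_eq_true hlt
            have hne : a ≠ t := fun he => by rw [← he] at hlt'; exact lt_irrefl _ hlt'
            have hpre := (pv_sw_iff a t).mp hswt
            rcases List.mem_cons.mp ht with rfl | ht'
            · exact hne rfl
            · rcases List.mem_cons.mp ht' with rfl | ht''
              · rw [hswt] at hsw; cases hsw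
              · have hbt : b < t := (List.pairwise_cons.mp hr).1 t ht''
                have hpab : a.toList <+: b.toList :=
                  pv_lex_between _ _ _ hpre (pv_lt_toList a b hab) (pv_lt_toList b t hbt)
                rw [(pv_sw_iff a b).mpr hpab] at hsw; cases hsw
          · exact h
      have ihr := ih hr
      rw [if_neg (by simp : ¬ (b :: r') = [])] at ihr
      rw [if_neg (by simp : ¬ (a :: b :: r') = []), hcard, ← ihr, key, pvPcount]
      cases hsw : PySem.Str.startswith b a
      · simp
        ring
      · simp

-- ===== glue =====
lemma pv_pvPb_congr (xs ys : List String) (h : ∀ t, t ∈ xs ↔ t ∈ ys) (s : String) :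
    pvPb xs s = pvPb ys s := by
  rcases Bool.eq_false_or_eq_true (pvPb ys s) with hb | hb <;> rw [hb]
  · obtain ⟨t, ht, hq⟩ := List.any_eq_true.mp hb
    exact List.any_eq_true.mpr ⟨t, (h t).mpr ht, hq⟩
  · rcases Bool.eq_false_or_eq_true (pvPb xs s) with ha | ha
    · obtain ⟨t, ht, hq⟩ := List.any_eq_true.mp ha
      have : pvPb ys s = true := List.any_eq_true.mpr ⟨t, (h t).mp ht, hq⟩
      rw [this] at hb; cases hb
    · exact ha

lemma pv_pvN_congr (xs ys : List String) (h : ∀ t, t ∈ xs ↔ t ∈ ys) : pvN xs = pvN ys := by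
  unfold pvN
  have hfin : xs.toFinset = ys.toFinset := by
    ext t; simp only [List.mem_toFinset]; exact h t
  rw [hfin]
  congr 1
  exact congrArg Finset.card
    (Finset.filter_congr (fun x _ => by rw [pv_pvPb_congr xs ys h x]))

-- ===== VERDICT (by name: the statement is the Claim_ definition above) =====
theorem solution_spec : Claim_equal_solution := by
  intro xs _
  show solution xs = solution_alt xs
  have hA : solution xs = pvN xs := by
    rw [pv_solution_eq_acount,
      pv_acount_eq_pvN _ (PySem.List.sorted_pairwise xs (fun s => PySem.Str.len s))]
    exact pv_pvN_congr _ _ (fun t => PySem.List.mem_sorted xs _ false t)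
  have hB : solution_alt xs = pvN xs := by
    rw [pv_alt_eq, pv_bcount_eq_pvN _ (PySem.List.sorted_ofList_pairwise_lt xs)]
    exact pv_pvN_congr _ _ (fun t =>
      (PySem.List.mem_sorted _ _ false t).trans (PySem.Set.mem_ofList xs t))
  rw [hA, hB]
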